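-- pv_equiv track=rewrite | github.com/fruizt/cryptography-app | back_py/app/controller/classic_controller/permutation_controller.py | decrypt_permutation
-- ===== SOURCE A (Python) =====
-- def decrypt_permutation(text,key,m):
--     key=[int(letter) for letter in key]
--     m=len(key)
--     #delete spaces and convert to lowercase
--     text=''.join(e for e in text if e.isalnum())
--     text=text.lower()
--     n=len(text)
--     block=[text[i-m:i] for i in range(m,n+1,m) ]
--
--     result=[]
--     for bl in block:
--         result_prev=[0]*m
--         for index in range(m):
--             actual_pos=key[index]
--             result_prev[index]=bl[actual_pos-1]
--         result.append("".join(result_prev))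
--     result_fin="".join(result)
--
--     return result_fin
-- ===== SOURCE B (Python) =====
-- def decrypt_permutation(text, key, m):
--     key = [int(v) for v in key]
--     m = len(key)
--     t = ''.join(c for c in text.lower() if c.isalnum())
--     n = len(t)
--     L = n - n % m
--     return ''.join(t[i - i % m + key[i % m] - 1] for i in range(L))
-- ===== Notes on version B (the rewrite author's own statement) =====
-- stated objective: simpler
-- what changed: Replaces the block-slicing pass plus nested per-block permutation loop (building a list of block strings, then a result list per block) with one flat pass over range(n - n%m) that addresses each output character directly as t[(i - i%m) + key[i%m] - 1].
-- outside the precondition, e.g. on decrypt_permutation('abcdef', [0, 1, 2], 0): A returns 'cabfde', B returns 'fabcde'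
import Mathlib
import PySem

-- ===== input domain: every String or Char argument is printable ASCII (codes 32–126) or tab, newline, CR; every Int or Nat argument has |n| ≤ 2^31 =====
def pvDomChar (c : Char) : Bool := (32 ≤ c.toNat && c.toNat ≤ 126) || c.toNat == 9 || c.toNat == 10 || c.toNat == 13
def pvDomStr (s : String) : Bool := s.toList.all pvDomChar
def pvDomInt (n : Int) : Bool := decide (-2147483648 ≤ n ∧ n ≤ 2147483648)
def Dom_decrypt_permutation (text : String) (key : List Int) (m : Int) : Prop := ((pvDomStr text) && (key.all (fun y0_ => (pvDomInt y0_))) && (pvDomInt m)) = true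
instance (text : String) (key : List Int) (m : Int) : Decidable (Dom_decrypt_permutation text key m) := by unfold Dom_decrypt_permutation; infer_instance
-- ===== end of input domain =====

-- B collapses A's block-slicing pass plus nested per-block permutation loop into one
-- flat pass that addresses each output character directly by modular arithmetic.

-- ===== PORT A =====
def decrypt_permutation (text : String) (key : List Int) (m : Int) : String :=
  -- key = [int(letter) for letter in key] : identity on a list of ints
  let key : List Int := key.map (fun v => v)
  -- m = len(key)
  let m : Int := (key.length : Int)
  -- text = ''.join(e for e in text if e.isalnum()); text = text.lower()
  let t : List Char := PySem.Chars.lower (text.toList.filter PySem.Chars.isalnum)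
  let n : Int := (t.length : Int)
  -- block = [text[i-m:i] for i in range(m, n+1, m)]
  let block : List (List Char) :=
    (PySem.List.pyRange m (n + 1) m).map (fun i => PySem.List.slice t (some (i - m)) (some i))
  -- the nested loop; bl[actual_pos-1] raises outside Pre_ (pyGetD default only reached there)
  let result : List (List Char) :=
    block.map (fun bl =>
      (List.range m.toNat).map (fun index =>
        let actual_pos : Int := key.getD index 0
        PySem.List.pyGetD bl (actual_pos - 1) ' '))
  String.mk result.flatten

-- ===== PORT B =====
def decrypt_permutation_alt (text : String) (key : List Int) (m : Int) : String :=
  let m : Int := (key.length : Int)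
  -- t = ''.join(c for c in text.lower() if c.isalnum())
  let t : List Char := (text.toList.map PySem.Chars.lowerChar).filter PySem.Chars.isalnum
  let n : Int := (t.length : Int)
  let L : Int := n - PySem.Int.mod n m
  String.mk ((PySem.List.pyRange 0 L 1).map (fun i =>
    let r : Int := PySem.Int.mod i m
    PySem.List.pyGetD t (i - r + key.getD r.toNat 0 - 1) ' '))

-- ===== PRECONDITION & SPEC =====
-- Pre_ excludes the empty key (A raises ValueError, B ZeroDivisionError) and, when the filtered
-- text holds at least one full block, key entries outside 1..len(key) — except the single-exact-
-- block case (filtered length = len(key)), where entries down to 1-len(key) wrap identically and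
-- stay admitted: entries below that range make A raise IndexError, entries above it too, and the
-- remaining entries ≤ 0 hit Python's negative-index wraparound inside a block — an accident of
-- A's per-block indexing that B's flat global index wraps differently.
def Pre_decrypt_permutation (text : String) (key : List Int) (m : Int) : Prop :=
  key ≠ [] ∧
  (key.length ≤ (text.toList.filter PySem.Chars.isalnum).length →
    ∀ v ∈ key,
      (1 ≤ v ∧ v ≤ (key.length : Int)) ∨
      ((text.toList.filter PySem.Chars.isalnum).length = key.length ∧
        1 - (key.length : Int) ≤ v ∧ v ≤ 0))
instance (text : String) (key : List Int) (m : Int) : Decidable (Pre_decrypt_permutation text key m) := by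
  unfold Pre_decrypt_permutation; infer_instance
def pvWitness_decrypt_permutation : String × List Int × Int := ("Hello World!", [3, 1, 2], 0)

def Spec_decrypt_permutation (text : String) (key : List Int) (m : Int) (out : String) : Prop := out = decrypt_permutation_alt text key m
instance (text : String) (key : List Int) (m : Int) (out : String) : Decidable (Spec_decrypt_permutation text key m out) := by unfold Spec_decrypt_permutation; infer_instance

-- ===== CLAIM (what is proved, stated in full; the proofs are below) =====
def Claim_equal_decrypt_permutation : Prop := ∀ (text : String) (key : List Int) (m : Int), Dom_decrypt_permutation text key m → Pre_decrypt_permutation text key m → Spec_decrypt_permutation text key m (decrypt_permutation text key m)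

-- ===== LEMMAS AND PROOFS =====

theorem isalnum_lowerChar (c : Char) :
    PySem.Chars.isalnum (PySem.Chars.lowerChar c) = PySem.Chars.isalnum c := by
  unfold PySem.Chars.isalnum PySem.Chars.lowerChar PySem.Chars.isalpha PySem.Chars.isdigit PySem.Chars.isupper PySem.Chars.islower
  simp only [Char.le_def]
  by_cases h : (decide ('A'.val ≤ c.val) && decide (c.val ≤ 'Z'.val)) = true
  · rw [if_pos h]
    simp only [Bool.and_eq_true, decide_eq_true_eq] at h
    have h1 : 65 ≤ c.toNat := UInt32.le_iff_toNat_le.mp h.1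
    have h2 : c.toNat ≤ 90 := UInt32.le_iff_toNat_le.mp h.2
    have hv : (c.toNat + 32).isValidChar := by left; omega
    have ht : (Char.ofNat (c.toNat + 32)).toNat = c.toNat + 32 := by
      rw [Char.toNat_ofNat]; simp [hv]
    have ht' : (Char.ofNat (c.toNat + 32)).val.toNat = c.toNat + 32 := ht
    have hc : c.toNat = c.val.toNat := rfl
    have e1 : 'A'.val.toNat = 65 := rfl
    have e2 : 'Z'.val.toNat = 90 := rfl
    have e3 : 'a'.val.toNat = 97 := rfl
    have e4 : 'z'.val.toNat = 122 := rfl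
    have e5 : '0'.val.toNat = 48 := rfl
    have e6 : '9'.val.toNat = 57 := rfl
    rw [Bool.eq_iff_iff]
    simp only [UInt32.le_iff_toNat_le, Bool.or_eq_true, Bool.and_eq_true, decide_eq_true_eq]
    omega
  · rw [if_neg h]

theorem filtered_comm (l : List Char) :
    PySem.Chars.lower (l.filter PySem.Chars.isalnum)
      = (l.map PySem.Chars.lowerChar).filter PySem.Chars.isalnum := by
  unfold PySem.Chars.lower
  rw [List.filter_map]
  have : l.filter (PySem.Chars.isalnum ∘ PySem.Chars.lowerChar) = l.filter PySem.Chars.isalnum := by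
    apply List.filter_congr
    intro c _
    exact isalnum_lowerChar c
  rw [this]

theorem chunk_map {α : Type} (g : Nat → α) (q mn : Nat) :
    (List.range (q * mn)).map g
      = ((List.range q).map (fun b => (List.range mn).map (fun j => g (b * mn + j)))).flatten := by
  induction q with
  | zero => simp
  | succ q ih =>
    rw [Nat.succ_mul, List.range_add, List.map_append, ih, List.range_succ, List.map_append,
      List.flatten_append]
    simp [List.map_map, Function.comp]

-- ===== VERDICT (by name: the statement is the Claim_ definition above) =====
theorem decrypt_permutation_spec : Claim_equal_decrypt_permutation := by
  intro text key m _hdom hpre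
  obtain ⟨hne, hkey⟩ := hpre
  unfold Spec_decrypt_permutation decrypt_permutation decrypt_permutation_alt
  simp only [List.map_id']
  rw [filtered_comm]
  set cs : List Char := (text.toList.map PySem.Chars.lowerChar).filter PySem.Chars.isalnum with hcs
  set M : Nat := key.length with hM
  set N : Nat := cs.length with hN
  have hM1 : 1 ≤ M := List.length_pos_of_ne_nil hne
  have hMpos : (0:Int) < (M:Int) := by exact_mod_cast hM1
  have hlenf : (text.toList.filter PySem.Chars.isalnum).length = N := by
    have := filtered_comm text.toList
    rw [hN, hcs, ← this, PySem.Chars.lower, List.length_map]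
  rw [hlenf] at hkey
  set q : Nat := N / M with hq
  -- A side: the pyRange of blocks
  rw [PySem.List.pyRange_of_pos _ _ hMpos]
  have hcount : (if (M:Int) < (N:Int) + 1 then (((N:Int) + 1 - (M:Int) + (M:Int) - 1) / (M:Int)).toNat else 0) = q := by
    split_ifs with h
    · have e : ((N:Int) + 1 - (M:Int) + (M:Int) - 1) = (N:Int) := by ring
      rw [e]
      have : ((N:Int)) / ((M:Int)) = (((N / M : Nat)) : Int) := by
        exact Int.ofNat_ediv_ofNat
      rw [this, Int.toNat_natCast]
    · have hNM : N < M := by omega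
      rw [hq, Nat.div_eq_of_lt hNM]
  rw [hcount]
  -- B side: mod and range
  simp only [PySem.Int.mod_natCast, Int.toNat_natCast]
  have hLB : ((N:Int) - ((N % M : Nat) : Int)) = (((q * M : Nat) : Int)) := by
    have h1 : q * M + N % M = N := by
      rw [hq]; exact Nat.div_add_mod' N M
    omega
  rw [hLB, PySem.List.pyRange_zero_natCast]
  congr 1
  rw [List.map_map, List.map_map, chunk_map, List.map_flatten, List.map_map]
  apply congrArg List.flatten
  apply List.map_congr_left
  intro b hb
  simp only [List.mem_range] at hb
  simp only [Function.comp]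
  have hMpos' : 0 < M := hM1
  have hMN : M ≤ N := by
    have : 1 ≤ q := by omega
    rw [hq] at this
    exact (Nat.one_le_div_iff hMpos').mp this
  have e1 : ((M:Int) + (M:Int) * (b:Int) - (M:Int)) = ((b * M : Nat) : Int) := by push_cast; ring
  have e2 : ((M:Int) + (M:Int) * (b:Int)) = ((b * M : Nat) : Int) + ((M : Nat) : Int) := by push_cast; ring
  rw [e1, e2, PySem.List.slice_natCast_add, List.map_map]
  apply List.map_congr_left
  intro j hj
  simp only [List.mem_range] at hj
  simp only [Function.comp]
  have hjk : j < key.length := by omega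
  have hvmem : key.getD j 0 ∈ key := by
    rw [List.getD_eq_getElem key 0 hjk]
    exact List.getElem_mem hjk
  rcases hkey hMN _ hvmem with ⟨hv1, hv2⟩ | ⟨hNM, hw1, hw2⟩
  case inr =>
    set v : Int := key.getD j 0 with hvdef
    have hq1 : q = 1 := by rw [hq, hNM]; exact Nat.div_self hM1
    have hb0 : b = 0 := by omega
    subst hb0
    have hmod : (0 * M + j) % M = j := by
      rw [Nat.mul_comm 0 M, Nat.mul_add_mod]
      exact Nat.mod_eq_of_lt hj
    simp only [PySem.Int.mod_natCast, Int.toNat_natCast, hmod]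
    have hbl : List.take M (List.drop (0 * M) cs) = cs := by
      rw [Nat.zero_mul, List.drop_zero]
      apply List.take_of_length_le
      omega
    have hidx : ((0 * M + j : Nat) : Int) - ((j : Nat) : Int) + v - 1 = v - 1 := by
      push_cast; ring
    rw [hbl, hidx]
  set v : Int := key.getD j 0 with hvdef
  set k : Nat := v.toNat - 1 with hkdef
  have hmod : (b * M + j) % M = j := by
    rw [Nat.mul_comm b M, Nat.mul_add_mod]
    exact Nat.mod_eq_of_lt hj
  simp only [PySem.Int.mod_natCast, Int.toNat_natCast, hmod]
  have hidx : ((b * M + j : Nat) : Int) - ((j : Nat) : Int) + v - 1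
      = ((b * M + k : Nat) : Int) := by push_cast; omega
  rw [hidx, PySem.List.pyGetD_natCast]
  have hv' : v - 1 = ((k : Nat) : Int) := by omega
  rw [hv', PySem.List.pyGetD_natCast]
  have hjM : k < M := by omega
  have hbMN : b * M + M ≤ N := by
    have h1 : b + 1 ≤ q := hb
    have h2 : (b+1) * M ≤ q * M := Nat.mul_le_mul_right M h1
    have h3 : q * M ≤ N := by rw [hq]; exact Nat.div_mul_le_self N M
    calc b * M + M = (b+1) * M := by ring
    _ ≤ q * M := h2
    _ ≤ N := h3
  have hcsN : cs.length = N := hN.symm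
  rw [List.getD_eq_getElem _ _ (by rw [List.length_take, List.length_drop, hcsN]; omega)]
  rw [List.getD_eq_getElem _ _ (by rw [hcsN]; omega)]
  rw [List.getElem_take, List.getElem_drop]
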